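-- pv_equiv track=rewrite | github.com/keiredin/leetcode | 2380-time-needed-to-rearrange-a-binary-string/2380-time-needed-to-rearrange-a-binary-string.py | secondsToRemoveOccurrences
-- ===== SOURCE A (Python) =====
-- def secondsToRemoveOccurrences(s: str) -> int:
--     if len(s) == 1:
--         return 0
--
--     seconds_needed = 0
--     temp = []
--     while True:
--         i = 0
--         process_complete = True
--         while i < len(s):
--             if i < len(s)-1 and s[i] == '0'and s[i+1] == '1':
--                 temp.append('1')
--                 temp.append('0')
--                 i += 2
--                 process_complete = False
--             else:
--                 temp.append(s[i])
--                 i += 1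
--
--         s = "".join(temp)
--         temp = []
--
--         if process_complete:
--             break
--
--         seconds_needed += 1
--     return seconds_needed
-- ===== SOURCE B (Python) =====
-- def secondsToRemoveOccurrences(s: str) -> int:
--     # One pass: per block of '0'/'1' chars (other chars are immovable barriers),
--     # each '1' preceded by zeros finishes at max(prev_finish + 1, zeros_so_far).
--     zeros = 0
--     cur = 0
--     ans = 0
--     for c in s:
--         if c == '0':
--             zeros += 1
--         elif c == '1':
--             if zeros > 0:
--                 cur = max(cur + 1, zeros)
--                 ans = max(ans, cur)
--         else:
--             zeros = 0
--             cur = 0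
--     return ans
-- ===== Notes on version B (the rewrite author's own statement) =====
-- stated objective: faster
-- what changed: Replaced the repeated rebuild-the-string simulation passes with a single left-to-right scan that tracks the zero count and each '1's finish time via seconds = max(seconds+1, zeros), with non-binary characters acting as barriers that reset the counters.
import Mathlib
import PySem

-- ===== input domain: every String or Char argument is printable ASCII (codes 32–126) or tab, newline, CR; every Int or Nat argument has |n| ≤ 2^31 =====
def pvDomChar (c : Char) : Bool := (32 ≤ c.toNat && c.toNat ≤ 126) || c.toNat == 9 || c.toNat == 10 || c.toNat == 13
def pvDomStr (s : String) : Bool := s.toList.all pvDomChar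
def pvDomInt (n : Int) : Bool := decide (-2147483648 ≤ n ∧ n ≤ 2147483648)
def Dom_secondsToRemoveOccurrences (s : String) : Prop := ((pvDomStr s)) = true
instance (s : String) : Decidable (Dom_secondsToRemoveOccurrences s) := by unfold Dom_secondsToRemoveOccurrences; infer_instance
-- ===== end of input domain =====

-- B replaces A's repeated rebuild-the-string simulation passes by a single left-to-right scan
-- (per '1' preceded by a zero: seconds = max(seconds + 1, zeros); other chars act as barriers).

-- ===== PORT A =====
-- one inner `while i < len(s)` pass of A: builds temp and the `process_complete` flag
def passA : List Char → List Char × Bool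
  | [] => ([], true)
  | [c] => ([c], true)
  | a :: b :: t =>
    if a = '0' ∧ b = '1' then ('1' :: '0' :: (passA t).1, false)
    else (a :: (passA (b :: t)).1, (passA (b :: t)).2)

-- termination measure for A's outer `while True` loop: number of ('0' before '1') pairs
def invCount : List Char → Nat
  | [] => 0
  | c :: t => (if c = '0' then t.count '1' else 0) + invCount t

theorem passA_cons2 (a b : Char) (t : List Char) :
    passA (a :: b :: t) =
      if a = '0' ∧ b = '1' then ('1' :: '0' :: (passA t).1, false)
      else (a :: (passA (b :: t)).1, (passA (b :: t)).2) := rfl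

theorem invCount_cons (c : Char) (t : List Char) :
    invCount (c :: t) = (if c = '0' then t.count '1' else 0) + invCount t := rfl

theorem passA_count1 (l : List Char) : ((passA l).1).count '1' = l.count '1' := by
  induction l using passA.induct with
  | case1 => rfl
  | case2 c => rfl
  | case3 a b t h ih =>
    obtain ⟨rfl, rfl⟩ := h
    rw [passA_cons2, if_pos ⟨rfl, rfl⟩]
    simp [ih]
  | case4 a b t h ih =>
    rw [passA_cons2, if_neg h]
    simp [List.count_cons, ih]

theorem passA_inv_le (l : List Char) : invCount (passA l).1 ≤ invCount l := by
  induction l using passA.induct with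
  | case1 => exact le_refl _
  | case2 c => exact le_refl _
  | case3 a b t h ih =>
    obtain ⟨rfl, rfl⟩ := h
    rw [passA_cons2, if_pos ⟨rfl, rfl⟩]
    have hc := passA_count1 t
    simp only [invCount_cons, List.count_cons] at ih hc ⊢
    simp only [hc]
    split_ifs <;> simp_all <;> omega
  | case4 a b t h ih =>
    rw [passA_cons2, if_neg h]
    have hc := passA_count1 (b :: t)
    simp only [invCount_cons, List.count_cons, beq_iff_eq] at ih hc ⊢
    split_ifs at ih hc ⊢ <;> omega
theorem passA_inv_lt (l : List Char) (h : (passA l).2 = false) :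
    invCount (passA l).1 < invCount l := by
  induction l using passA.induct with
  | case1 => simp [passA] at h
  | case2 c => simp [passA] at h
  | case3 a b t hp ih =>
    obtain ⟨rfl, rfl⟩ := hp
    rw [passA_cons2, if_pos ⟨rfl, rfl⟩]
    have hc := passA_count1 t
    have hle := passA_inv_le t
    simp only [invCount_cons, List.count_cons] at hle hc ⊢
    simp only [hc]
    split_ifs <;> simp_all <;> omega
  | case4 a b t hp ih =>
    rw [passA_cons2, if_neg hp] at h ⊢
    simp only at h
    have hc := passA_count1 (b :: t)
    have := ih h
    simp only [invCount_cons, List.count_cons, beq_iff_eq] at this hc ⊢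
    split_ifs at this hc ⊢ <;> omega

-- A's outer `while True` loop
def loopA (l : List Char) (sec : Int) : Int :=
  if h : (passA l).2 = true then sec
  else loopA (passA l).1 (sec + 1)
termination_by invCount l
decreasing_by exact passA_inv_lt l (by simpa using h)

def secondsToRemoveOccurrences (s : String) : Int :=
  if PySem.Str.len s = 1 then 0 else loopA s.toList 0

-- ===== PORT B =====
-- the body of B's single `for c in s` loop, over state (zeros, cur, ans)
def stepB (st : Int × Int × Int) (ch : Char) : Int × Int × Int :=
  if ch = '0' then (st.1 + 1, st.2.1, st.2.2)
  else if ch = '1' then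
    if 0 < st.1 then (st.1, max (st.2.1 + 1) st.1, max st.2.2 (max (st.2.1 + 1) st.1))
    else st
  else (0, 0, st.2.2)

def secondsToRemoveOccurrences_alt (s : String) : Int :=
  (s.toList.foldl stepB ((0 : Int), (0 : Int), (0 : Int))).2.2

-- ===== PRECONDITION & SPEC =====
def Spec_secondsToRemoveOccurrences (s : String) (out : Int) : Prop := out = secondsToRemoveOccurrences_alt s
instance (s : String) (out : Int) : Decidable (Spec_secondsToRemoveOccurrences s out) := by unfold Spec_secondsToRemoveOccurrences; infer_instance

-- ===== CLAIM (what is proved, stated in full; the proofs are below) =====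
def Claim_equal_secondsToRemoveOccurrences : Prop := ∀ (s : String), Dom_secondsToRemoveOccurrences s → Spec_secondsToRemoveOccurrences s (secondsToRemoveOccurrences s)

-- ===== LEMMAS AND PROOFS =====

theorem passA_nil : passA [] = ([], true) := rfl
theorem passA_one (c : Char) : passA [c] = ([c], true) := rfl
theorem passA_swap (t : List Char) :
    passA ('0' :: '1' :: t) = ('1' :: '0' :: (passA t).1, false) := by
  rw [passA_cons2, if_pos ⟨rfl, rfl⟩]
theorem passA_nonswap (a b : Char) (t : List Char) (h : ¬(a = '0' ∧ b = '1')) :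
    passA (a :: b :: t) = (a :: (passA (b :: t)).1, (passA (b :: t)).2) := by
  rw [passA_cons2, if_neg h]

-- the common value: B's scan over l from state (z = zeros, c = cur),
-- returning the max finish time over the rest of the string
def F (z c : Nat) : List Char → Nat
  | [] => c
  | ch :: t =>
    if ch = '0' then F (z + 1) c t
    else if ch = '1' then F z (if 0 < z then max (c + 1) z else c) t
    else max c (F 0 0 t)

theorem F_nil (z c : Nat) : F z c [] = c := rfl
theorem F_zero (z c : Nat) (t : List Char) : F z c ('0' :: t) = F (z + 1) c t := rfl
theorem F_one (z c : Nat) (t : List Char) :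
    F z c ('1' :: t) = F z (if 0 < z then max (c + 1) z else c) t := rfl
theorem F_barrier (z c : Nat) (ch : Char) (t : List Char) (h0 : ch ≠ '0') (h1 : ch ≠ '1') :
    F z c (ch :: t) = max c (F 0 0 t) := by
  show (if ch = '0' then F (z + 1) c t
    else if ch = '1' then F z (if 0 < z then max (c + 1) z else c) t
    else max c (F 0 0 t)) = max c (F 0 0 t)
  rw [if_neg h0, if_neg h1]

theorem F_le (l : List Char) : ∀ z c, c ≤ F z c l := by
  induction l with
  | nil => intro z c; exact le_refl _
  | cons ch t ih =>
    intro z c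
    by_cases h0 : ch = '0'
    · subst h0; rw [F_zero]; exact ih _ _
    · by_cases h1 : ch = '1'
      · subst h1; rw [F_one]
        by_cases hz : 0 < z
        · rw [if_pos hz]
          have := ih z (max (c + 1) z)
          omega
        · rw [if_neg hz]
          exact ih z c
      · rw [F_barrier _ _ _ _ h0 h1]; omega

-- flag = true (no swap in the pass) means the scan value is just the carried cur
theorem F_of_complete (l : List Char) (h : (passA l).2 = true) :
    ∀ z c, (0 < z → l.head? ≠ some '1') → F z c l = c := by
  induction l using passA.induct with
  | case1 => intro z c _; exact F_nil z c
  | case2 ch =>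
    intro z c hh
    by_cases h0 : ch = '0'
    · subst h0; rw [F_zero, F_nil]
    · by_cases h1 : ch = '1'
      · subst h1
        have hz : ¬ 0 < z := fun hz => (hh hz) (by simp)
        rw [F_one, if_neg hz, F_nil]
      · rw [F_barrier _ _ _ _ h0 h1, F_nil]; omega
  | case3 a b t hp ih =>
    obtain ⟨rfl, rfl⟩ := hp
    rw [passA_swap] at h
    simp at h
  | case4 a b t hp ih =>
    rw [passA_nonswap a b t hp] at h
    simp only at h
    intro z c hh
    by_cases h0 : a = '0'
    · subst h0
      have hb : b ≠ '1' := fun hb' => hp ⟨rfl, hb'⟩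
      rw [F_zero]
      exact ih h (z + 1) c (fun _ => by simpa using hb)
    · by_cases h1 : a = '1'
      · subst h1
        have hz : ¬ 0 < z := fun hz => (hh hz) (by simp)
        rw [F_one, if_neg hz]
        exact ih h z c (fun hz' => absurd hz' hz)
      · rw [F_barrier _ _ _ _ h0 h1]
        rw [ih h 0 0 (fun hz' => absurd hz' (by omega))]
        omega

theorem F_pos_of_incomplete (l : List Char) (h : (passA l).2 = false) :
    ∀ z c, 1 ≤ F z c l := by
  induction l using passA.induct with
  | case1 => simp [passA_nil] at h
  | case2 c => rw [passA_one] at h; simp at h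
  | case3 a b t hp ih =>
    obtain ⟨rfl, rfl⟩ := hp
    intro z c
    rw [F_zero, F_one, if_pos (Nat.succ_pos z)]
    have := F_le t (z + 1) (max (c + 1) (z + 1))
    omega
  | case4 a b t hp ih =>
    rw [passA_nonswap a b t hp] at h
    simp only at h
    intro z c
    by_cases h0 : a = '0'
    · subst h0; rw [F_zero]; exact ih h _ _
    · by_cases h1 : a = '1'
      · subst h1; rw [F_one]; exact ih h _ _
      · rw [F_barrier _ _ _ _ h0 h1]
        have := ih h 0 0
        omega

-- the decrement lemma: one pass of A lowers the scan value by exactly one (Nat monus)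
theorem F_pass (l : List Char) :
    ∀ z cN cO, cN = cO - 1 → (z = 0 → cO = 0) →
      (0 < z → l.head? = some '1' → z ≤ cO) →
      F z cN (passA l).1 = F z cO l - 1 := by
  induction l using passA.induct with
  | case1 =>
    intro z cN cO h1 _ _
    rw [passA_nil]
    simp [F_nil, h1]
  | case2 ch =>
    intro z cN cO h1 h2 h3
    rw [passA_one]
    simp only
    by_cases h0 : ch = '0'
    · subst h0; rw [F_zero, F_zero, F_nil, F_nil, h1]
    · by_cases hc1 : ch = '1'
      · subst hc1
        by_cases hz : 0 < z
        · have hzc : z ≤ cO := h3 hz (by simp)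
          rw [F_one, F_one, if_pos hz, if_pos hz, F_nil, F_nil]
          omega
        · rw [F_one, F_one, if_neg hz, if_neg hz, F_nil, F_nil, h1]
      · rw [F_barrier _ _ _ _ h0 hc1, F_barrier _ _ _ _ h0 hc1, F_nil]
        omega
  | case3 a b t hp ih =>
    obtain ⟨rfl, rfl⟩ := hp
    intro z cN cO h1 h2 h3
    rw [passA_swap]
    simp only
    rw [F_one, F_zero, F_zero, F_one, if_pos (Nat.succ_pos z)]
    exact ih (z + 1) _ (max (cO + 1) (z + 1))
      (by split_ifs with hz <;> omega) (by omega) (fun _ _ => by omega)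
  | case4 a b t hp ih =>
    intro z cN cO h1 h2 h3
    rw [passA_nonswap a b t hp]
    simp only
    by_cases h0 : a = '0'
    · subst h0
      have hb : b ≠ '1' := fun hb' => hp ⟨rfl, hb'⟩
      rw [F_zero, F_zero]
      exact ih (z + 1) cN cO h1 (by omega) (fun _ hh => absurd (by simpa using hh) hb)
    · by_cases hc1 : a = '1'
      · subst hc1
        rw [F_one, F_one]
        by_cases hz : 0 < z
        · have hzc : z ≤ cO := h3 hz (by simp)
          rw [if_pos hz, if_pos hz]
          exact ih z (max (cN + 1) z) (max (cO + 1) z) (by omega) (by omega) (fun _ _ => by omega)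
        · rw [if_neg hz, if_neg hz]
          exact ih z cN cO h1 h2 (fun hz' _ => absurd hz' hz)
      · rw [F_barrier _ _ _ _ h0 hc1, F_barrier _ _ _ _ h0 hc1]
        rw [ih 0 0 0 rfl (fun _ => rfl) (fun hf _ => absurd hf (by omega))]
        omega

theorem loopA_eq (l : List Char) (sec : Int) : loopA l sec = sec + (F 0 0 l : Int) := by
  rw [loopA]
  by_cases h : (passA l).2 = true
  · rw [dif_pos h, F_of_complete l h 0 0 (fun hz => absurd hz (by omega))]
    simp
  · rw [dif_neg h]
    rw [loopA_eq (passA l).1 (sec + 1)]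
    have hf : (passA l).2 = false := by simpa using h
    have hd := F_pass l 0 0 0 rfl (fun _ => rfl) (fun hz _ => absurd hz (by omega))
    have hp := F_pos_of_incomplete l hf 0 0
    rw [hd, Nat.cast_sub hp]
    push_cast
    ring
termination_by invCount l
decreasing_by exact passA_inv_lt l (by simpa using h)

-- B-side: the fold in Nat
def FB (z c a : Nat) : List Char → Nat
  | [] => a
  | ch :: t =>
    if ch = '0' then FB (z + 1) c a t
    else if ch = '1' then
      if 0 < z then FB z (max (c + 1) z) (max a (max (c + 1) z)) t else FB z c a t
    else FB 0 0 a t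

theorem FB_nil (z c a : Nat) : FB z c a [] = a := rfl
theorem FB_zero (z c a : Nat) (t : List Char) : FB z c a ('0' :: t) = FB (z + 1) c a t := rfl
theorem FB_one (z c a : Nat) (t : List Char) :
    FB z c a ('1' :: t) =
      if 0 < z then FB z (max (c + 1) z) (max a (max (c + 1) z)) t else FB z c a t := rfl
theorem FB_barrier (z c a : Nat) (ch : Char) (t : List Char) (h0 : ch ≠ '0') (h1 : ch ≠ '1') :
    FB z c a (ch :: t) = FB 0 0 a t := by
  show (if ch = '0' then FB (z + 1) c a t
    else if ch = '1' then
      if 0 < z then FB z (max (c + 1) z) (max a (max (c + 1) z)) t else FB z c a t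
    else FB 0 0 a t) = FB 0 0 a t
  rw [if_neg h0, if_neg h1]

theorem stepB_zero (st : Int × Int × Int) : stepB st '0' = (st.1 + 1, st.2.1, st.2.2) := rfl
theorem stepB_one (st : Int × Int × Int) :
    stepB st '1' =
      if 0 < st.1 then (st.1, max (st.2.1 + 1) st.1, max st.2.2 (max (st.2.1 + 1) st.1))
      else st := rfl
theorem stepB_barrier (st : Int × Int × Int) (ch : Char) (h0 : ch ≠ '0') (h1 : ch ≠ '1') :
    stepB st ch = (0, 0, st.2.2) := by
  unfold stepB
  rw [if_neg h0, if_neg h1]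

theorem fold_cast (l : List Char) : ∀ z c a : Nat,
    (l.foldl stepB ((z : Int), (c : Int), (a : Int))).2.2 = (FB z c a l : Int) := by
  induction l with
  | nil => intro z c a; rw [List.foldl_nil, FB_nil]
  | cons ch t ih =>
    intro z c a
    rw [List.foldl_cons]
    by_cases h0 : ch = '0'
    · subst h0
      rw [stepB_zero, FB_zero]
      have := ih (z + 1) c a
      push_cast at this ⊢
      exact this
    · by_cases h1 : ch = '1'
      · subst h1
        rw [stepB_one, FB_one]
        dsimp only
        by_cases hz : 0 < z
        · rw [if_pos (by exact_mod_cast hz : (0 : Int) < (z : Int)), if_pos hz]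
          have := ih z (max (c + 1) z) (max a (max (c + 1) z))
          push_cast at this ⊢
          exact this
        · rw [if_neg (by exact_mod_cast hz : ¬ (0 : Int) < (z : Int)), if_neg hz]
          exact ih z c a
      · rw [stepB_barrier _ _ h0 h1, FB_barrier _ _ _ _ _ h0 h1]
        have := ih 0 0 a
        push_cast at this ⊢
        exact this

theorem FB_eq (l : List Char) : ∀ z c a, c ≤ a → FB z c a l = max a (F z c l) := by
  induction l with
  | nil => intro z c a h; rw [FB_nil, F_nil]; omega
  | cons ch t ih =>
    intro z c a h
    by_cases h0 : ch = '0'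
    · subst h0; rw [FB_zero, F_zero]; exact ih _ _ _ h
    · by_cases h1 : ch = '1'
      · subst h1
        rw [FB_one, F_one]
        by_cases hz : 0 < z
        · rw [if_pos hz, if_pos hz]
          rw [ih z (max (c + 1) z) (max a (max (c + 1) z)) (by omega)]
          have := F_le t z (max (c + 1) z)
          omega
        · rw [if_neg hz, if_neg hz]; exact ih _ _ _ h
      · rw [FB_barrier _ _ _ _ _ h0 h1, F_barrier _ _ _ _ h0 h1]
        rw [ih 0 0 a (by omega)]
        have := F_le t 0 0
        omega

theorem alt_eq (s : String) : secondsToRemoveOccurrences_alt s = (F 0 0 s.toList : Int) := by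
  unfold secondsToRemoveOccurrences_alt
  have h := fold_cast s.toList 0 0 0
  push_cast at h
  rw [h, FB_eq s.toList 0 0 0 (le_refl 0)]
  simp

theorem F_singleton (c : Char) : F 0 0 [c] = 0 := by
  by_cases h0 : c = '0'
  · subst h0; rw [F_zero, F_nil]
  · by_cases h1 : c = '1'
    · subst h1; rw [F_one, if_neg (by omega), F_nil]
    · rw [F_barrier _ _ _ _ h0 h1, F_nil]
      omega

-- ===== VERDICT (by name: the statement is the Claim_ definition above) =====
theorem secondsToRemoveOccurrences_spec : Claim_equal_secondsToRemoveOccurrences := by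
  intro s _dom
  unfold Spec_secondsToRemoveOccurrences
  rw [alt_eq]
  unfold secondsToRemoveOccurrences
  by_cases h : PySem.Str.len s = 1
  · rw [if_pos h]
    have hl : s.toList.length = 1 := by
      have := PySem.Str.len_eq s
      omega
    obtain ⟨c, hc⟩ : ∃ c, s.toList = [c] := by
      cases hls : s.toList with
      | nil => simp [hls] at hl
      | cons c t =>
        cases t with
        | nil => exact ⟨c, rfl⟩
        | cons d u => simp [hls] at hl
    rw [hc, F_singleton]
    simp
  · rw [if_neg h, loopA_eq]
    simp
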